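-- pv_equiv track=rewrite | github.com/oliveplums/AIS-Dash | app.py | detect_mmsi_changes
-- ===== SOURCE A (Python) =====
-- def detect_mmsi_changes(voyage_data, end_date: str):
--     mmsi_values = [entry['mmsi'] for entry in voyage_data]
--     mmsis = list(set(mmsi_values))
--     previous_mmsi = None
--     timestamp_changes = []
--
--     for entry in voyage_data:
--         current_mmsi = entry['mmsi']
--         timestamp = entry['timestamp']
--         if current_mmsi != previous_mmsi:
--             if previous_mmsi is not None:
--                 timestamp_changes.append((previous_mmsi, current_mmsi, timestamp))
--         previous_mmsi = current_mmsi
--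
--     if not timestamp_changes:
--         timestamp_changes.append((mmsis[0], mmsis[0], end_date))
--     elif len(timestamp_changes) > 1:
--         source = timestamp_changes[-1][1]
--         sourcetime = timestamp_changes[-1][2]
--         for i in range(len(timestamp_changes) - 1, -1, -1):
--             if timestamp_changes[i][0] in [row[1] for row in timestamp_changes[:i]]:
--                 timestamp_changes.pop(i)
--         timestamp_changes = [(timestamp_changes[0][0], source, sourcetime)]
--
--     return timestamp_changes
-- ===== SOURCE B (Python) =====
-- def detect_mmsi_changes(voyage_data, end_date: str):
--     previous = None
--     first_source = None
--     last_target = None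
--     last_time = None
--     for entry in voyage_data:
--         cur = entry['mmsi']
--         ts = entry['timestamp']
--         if previous is not None and cur != previous:
--             if first_source is None:
--                 first_source = previous
--             last_target = cur
--             last_time = ts
--         previous = cur
--     if first_source is None:
--         return [(previous, previous, end_date)]
--     return [(first_source, last_target, last_time)]
-- ===== Notes on version B (the rewrite author's own statement) =====
-- stated objective: simpler
-- what changed: Replaces A's transition-list build plus quadratic back-to-front pop loop and two-branch post-processing by one linear pass tracking previous, first source, and last target/time accumulators.
import Mathlib
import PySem

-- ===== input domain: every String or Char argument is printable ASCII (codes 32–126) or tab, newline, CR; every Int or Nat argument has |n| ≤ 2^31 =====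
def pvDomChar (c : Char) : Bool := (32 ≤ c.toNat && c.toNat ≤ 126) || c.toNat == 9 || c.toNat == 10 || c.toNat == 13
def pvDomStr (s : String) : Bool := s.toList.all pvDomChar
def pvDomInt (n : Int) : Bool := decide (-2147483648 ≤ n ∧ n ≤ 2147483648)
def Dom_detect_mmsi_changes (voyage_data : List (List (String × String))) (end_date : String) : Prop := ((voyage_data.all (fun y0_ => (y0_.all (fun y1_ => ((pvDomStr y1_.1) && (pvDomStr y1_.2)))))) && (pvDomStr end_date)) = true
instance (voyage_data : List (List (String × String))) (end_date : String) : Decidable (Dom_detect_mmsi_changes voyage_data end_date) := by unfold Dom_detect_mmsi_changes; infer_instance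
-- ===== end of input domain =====

-- B replaces A's transition list plus its quadratic pop-based post-processing by a single pass
-- with three accumulators (first source, last target, last change time); objective: simpler.

-- entry['mmsi'] / entry['timestamp'] — dict lookup, first match; `.getD ""` only totalizes:
-- Pre_ guarantees the key is present (Python raises KeyError otherwise).
def pvGetKey (e : List (String × String)) (k : String) : Option String :=
  (PySem.Dict.mk e).get? k

-- ===== PORT A =====
-- one iteration of A's for-loop: state = (previous_mmsi, timestamp_changes)
def pvAStep (s : Option String × List (String × String × String)) (e : List (String × String)) :
    Option String × List (String × String × String) :=
  let cur := (pvGetKey e "mmsi").getD ""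
  let ts := (pvGetKey e "timestamp").getD ""
  let ch :=
    if some cur ≠ s.1 then
      match s.1 with
      | some p => s.2 ++ [(p, cur, ts)]
      | none => s.2
    else s.2
  (some cur, ch)

-- body of `if timestamp_changes[i][0] in [row[1] for row in timestamp_changes[:i]]: …pop(i)`
def pvPopStep (tc : List (String × String × String)) (i : Nat) : List (String × String × String) :=
  if (PySem.List.pyGetD tc (i : Int) ("", "", "")).1 ∈
      (PySem.List.slice tc none (some (i : Int))).map (fun r => r.2.1) then
    ((PySem.List.pop? tc (i : Int)).map (·.2)).getD tc
  else tc

-- `for i in range(len(timestamp_changes) - 1, -1, -1)`: processes index i, then i-1, …, then 0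
def pvPopLoop (tc : List (String × String × String)) : Nat → List (String × String × String)
  | 0 => pvPopStep tc 0
  | i + 1 => pvPopLoop (pvPopStep tc (i + 1)) i

def detect_mmsi_changes (voyage_data : List (List (String × String))) (end_date : String) : List (String × String × String) :=
  let mmsi_values := voyage_data.map (fun e => (pvGetKey e "mmsi").getD "")
  let mmsis := PySem.Set.ofList mmsi_values
  let st := voyage_data.foldl pvAStep (none, [])
  let tc := st.2
  if tc = [] then
    [(mmsis.headD "", mmsis.headD "", end_date)]
  else if tc.length > 1 then
    let last := tc.getLast?.getD ("", "", "")
    let source := last.2.1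
    let sourcetime := last.2.2
    let tc2 := pvPopLoop tc (tc.length - 1)
    [((tc2.headD ("", "", "")).1, source, sourcetime)]
  else tc

-- ===== PORT B =====
-- one iteration of B's single pass: state = (previous, first_source, last_target, last_time)
def pvBStep (s : Option String × Option String × String × String) (e : List (String × String)) :
    Option String × Option String × String × String :=
  let cur := (pvGetKey e "mmsi").getD ""
  let ts := (pvGetKey e "timestamp").getD ""
  match s with
  | (prev, fs, lt, lti) =>
    if prev.isSome ∧ some cur ≠ prev then
      (some cur, (if fs = none then prev else fs), cur, ts)
    else (some cur, fs, lt, lti)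

def detect_mmsi_changes_alt (voyage_data : List (List (String × String))) (end_date : String) : List (String × String × String) :=
  match voyage_data.foldl pvBStep (none, none, "", "") with
  | (prev, none, _, _) => [(prev.getD "", prev.getD "", end_date)]
  | (_, some fs, lt, lti) => [(fs, lt, lti)]

-- ===== PRECONDITION & SPEC =====
-- Pre_ excludes exactly the inputs where the Python A raises: the empty list (IndexError on
-- mmsis[0]) and entries missing the 'mmsi' or 'timestamp' key (KeyError).
def Pre_detect_mmsi_changes (voyage_data : List (List (String × String))) (_end_date : String) : Prop :=
  voyage_data ≠ [] ∧
    ∀ e ∈ voyage_data, ((PySem.Dict.mk e).get? "mmsi").isSome ∧ ((PySem.Dict.mk e).get? "timestamp").isSome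
instance (voyage_data : List (List (String × String))) (end_date : String) : Decidable (Pre_detect_mmsi_changes voyage_data end_date) := by unfold Pre_detect_mmsi_changes; infer_instance

def pvWitness_detect_mmsi_changes : (List (List (String × String))) × String :=
  ([[("mmsi", "123"), ("timestamp", "t1")], [("mmsi", "456"), ("timestamp", "t2")]], "end")

def Spec_detect_mmsi_changes (voyage_data : List (List (String × String))) (end_date : String) (out : List (String × String × String)) : Prop := out = detect_mmsi_changes_alt voyage_data end_date
instance (voyage_data : List (List (String × String))) (end_date : String) (out : List (String × String × String)) : Decidable (Spec_detect_mmsi_changes voyage_data end_date out) := by unfold Spec_detect_mmsi_changes; infer_instance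

-- ===== CLAIM (what is proved, stated in full; the proofs are below) =====
def Claim_equal_detect_mmsi_changes : Prop := ∀ (voyage_data : List (List (String × String))) (end_date : String), Dom_detect_mmsi_changes voyage_data end_date → Pre_detect_mmsi_changes voyage_data end_date → Spec_detect_mmsi_changes voyage_data end_date (detect_mmsi_changes voyage_data end_date)

-- ===== LEMMAS AND PROOFS =====

-- chain relation of A's transition list: each transition starts where the previous one ended
def pvRel (a b : String × String × String) : Prop := b.1 = a.2.1

-- invariant tying A's loop state (prev, tc) to B's loop state (prev, fs, lt, lti)
def pvInv (prev : Option String) (tc : List (String × String × String))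
    (fs : Option String) (lt lti : String) : Prop :=
  (fs = none → tc = []) ∧
  (∀ s, fs = some s →
    tc.head?.map (·.1) = some s ∧ (∃ a, tc.getLast? = some (a, lt, lti)) ∧
    List.IsChain pvRel tc ∧ prev = some lt)

theorem pvSet_const_aux (v : String) : ∀ xs : List String, (∀ x ∈ xs, x = v) →
    xs.foldl PySem.Set.add [v] = [v] := by
  intro xs
  induction xs with
  | nil => intro _; rfl
  | cons x t ih =>
    intro h
    have hx : x = v := h x (by simp)
    subst hx
    have : PySem.Set.add [x] x = [x] := by simp [PySem.Set.add, PySem.Set.contains]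
    simp only [List.foldl_cons, this]
    exact ih (fun y hy => h y (by simp [hy]))

theorem pvSet_const (v : String) : ∀ xs : List String, (∀ x ∈ xs, x = v) →
    xs ≠ [] → PySem.Set.ofList xs = [v] := by
  intro xs h hne
  match xs, hne with
  | x :: t, _ =>
    have hx : x = v := h x (by simp)
    subst hx
    have : PySem.Set.ofList (x :: t) = t.foldl PySem.Set.add [x] := by
      simp [PySem.Set.ofList_eq_foldl, PySem.Set.add, PySem.Set.contains]
    rw [this]
    exact pvSet_const_aux x t (fun y hy => h y (by simp [hy]))

theorem pvPopLoop_chain (tc : List (String × String × String)) (h : List.IsChain pvRel tc) :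
    ∀ i, i < tc.length → pvPopLoop (tc.take (i + 1)) i = tc.take 1 := by
  intro i
  induction i with
  | zero =>
    intro _
    show pvPopStep (tc.take 1) 0 = tc.take 1
    rw [pvPopStep, PySem.List.slice_to_natCast (tc.take 1) 0]
    simp
  | succ i ih =>
    intro hi
    have hlen : (tc.take (i + 2)).length = i + 2 := by
      rw [List.length_take]; omega
    have hget : PySem.List.pyGetD (tc.take (i + 2)) ((i + 1 : Nat) : Int) ("", "", "") =
        tc[i + 1]'(by omega) := by
      have := PySem.List.pyGetD_natCast (tc.take (i+2)) (i+1) (("",("","")) : String × String × String)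
      rw [show ((i + 1 : Nat) : Int) = ((i+1 : Nat) : Int) from rfl] at *
      rw [this]
      rw [List.getD_eq_getElem _ _ (by omega)]
      simp
    have hchain : (tc[i + 1]'(by omega)).1 = (tc[i]'(by omega)).2.1 :=
      List.isChain_iff_getElem.1 h i (by omega)
    have hmem : (tc[i + 1]'(by omega)).1 ∈ (tc.take (i + 1)).map (fun r => r.2.1) := by
      rw [hchain]
      exact List.mem_map.2 ⟨tc[i]'(by omega), by
        exact List.mem_take_iff_getElem.2 ⟨i, by omega, by simp⟩, rfl⟩
    have hslice : PySem.List.slice (tc.take (i + 2)) none (some ((i + 1 : Nat) : Int)) =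
        tc.take (i + 1) := by
      rw [PySem.List.slice_to_natCast, List.take_take]
      congr 1; omega
    have hpop : ((PySem.List.pop? (tc.take (i + 2)) ((i + 1 : Nat) : Int)).map (·.2)).getD (tc.take (i+2)) =
        tc.take (i + 1) := by
      rw [PySem.List.pop?_natCast _ _ (by omega)]
      simp only [Option.map_some, Option.getD_some]
      have : (i + 1) = (tc.take (i + 2)).length - 1 := by omega
      rw [this, List.eraseIdx_length_sub_one, List.dropLast_eq_take, hlen, List.take_take]
      congr 1; omega
    have hstep : pvPopStep (tc.take (i + 2)) (i + 1) = tc.take (i + 1) := by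
      rw [pvPopStep]
      push_cast at hget hslice hpop ⊢
      rw [hget, hslice, if_pos hmem, hpop]
    show pvPopLoop (pvPopStep (tc.take (i + 2)) (i + 1)) i = tc.take 1
    rw [hstep]
    exact ih (by omega)

theorem pvLoop_lemma (l : List (List (String × String))) :
    ∀ prev tc fs lt lti, pvInv prev tc fs lt lti →
    (l.foldl pvAStep (prev, tc)).1 = (l.foldl pvBStep (prev, fs, lt, lti)).1 ∧
    pvInv (l.foldl pvAStep (prev, tc)).1 (l.foldl pvAStep (prev, tc)).2
      (l.foldl pvBStep (prev, fs, lt, lti)).2.1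
      (l.foldl pvBStep (prev, fs, lt, lti)).2.2.1
      (l.foldl pvBStep (prev, fs, lt, lti)).2.2.2 ∧
    ((l.foldl pvAStep (prev, tc)).2 = [] →
      tc = [] ∧ (∀ e ∈ l, some ((pvGetKey e "mmsi").getD "") = (l.foldl pvAStep (prev, tc)).1) ∧
      (∀ p, prev = some p → prev = (l.foldl pvAStep (prev, tc)).1)) := by
  induction l with
  | nil =>
    intro prev tc fs lt lti hinv
    refine ⟨rfl, hinv, fun h => ⟨h, by simp, fun p hp => rfl⟩⟩
  | cons e l ih =>
    intro prev tc fs lt lti hinv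
    set cur := (pvGetKey e "mmsi").getD "" with hcur
    set ts := (pvGetKey e "timestamp").getD "" with hts
    -- the two one-step results
    have hA : List.foldl pvAStep (prev, tc) (e :: l) =
        List.foldl pvAStep (pvAStep (prev, tc) e) l := by simp
    have hB : List.foldl pvBStep (prev, fs, lt, lti) (e :: l) =
        List.foldl pvBStep (pvBStep (prev, fs, lt, lti) e) l := by simp
    rw [hA, hB]
    -- case analysis on the step
    by_cases hp : ∃ p, prev = some p
    · obtain ⟨p, rfl⟩ := hp
      by_cases hc : cur = p
      · -- no change
        have hA1 : pvAStep (some p, tc) e = (some cur, tc) := by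
          simp [pvAStep, ← hcur, hc]
        have hB1 : pvBStep (some p, fs, lt, lti) e = (some cur, fs, lt, lti) := by
          simp [pvBStep, ← hcur, hc]
        rw [hA1, hB1]
        have hinv' : pvInv (some cur) tc fs lt lti := by
          refine ⟨hinv.1, fun s hs => ?_⟩
          obtain ⟨h1, h2, h3, h4⟩ := hinv.2 s hs
          exact ⟨h1, h2, h3, by rw [hc]; exact h4⟩
        obtain ⟨c1, c2, c3⟩ := ih (some cur) tc fs lt lti hinv'
        refine ⟨c1, c2, fun hnil => ?_⟩
        obtain ⟨d1, d2, d3⟩ := c3 hnil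
        refine ⟨d1, ?_, ?_⟩
        · intro e' he'
          rcases List.mem_cons.1 he' with he' | he'
          · subst he'; exact d3 cur rfl
          · exact d2 e' he'
        · intro q hq
          rw [show some p = some cur by rw [hc]]
          exact d3 cur rfl
      · -- change
        have hA1 : pvAStep (some p, tc) e = (some cur, tc ++ [(p, cur, ts)]) := by
          simp [pvAStep, ← hcur, ← hts, hc]
        have hB1 : pvBStep (some p, fs, lt, lti) e =
            (some cur, (if fs = none then some p else fs), cur, ts) := by
          simp [pvBStep, ← hcur, ← hts]
          intro h; exact absurd h hc
        rw [hA1, hB1]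
        have hinv' : pvInv (some cur) (tc ++ [(p, cur, ts)])
            (if fs = none then some p else fs) cur ts := by
          constructor
          · intro h
            rcases fs with _ | s <;> simp_all
          · intro s hs
            rcases fs with _ | s0
            · have hs' : p = s := by
                have : some p = some s := by simpa using hs
                injection this
              subst hs'
              have htc : tc = [] := hinv.1 rfl
              subst htc
              refine ⟨by simp, ⟨p, by simp⟩, by simp, rfl⟩
            · have hs' : s0 = s := by
                have : some s0 = some s := by simpa using hs
                injection this
              subst hs'
              obtain ⟨h1, h2, h3, h4⟩ := hinv.2 s0 rfl
              have htcne : tc ≠ [] := by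
                intro h; subst h; simp at h1
              obtain ⟨a, ha⟩ := h2
              refine ⟨?_, ⟨p, by simp⟩, ?_, rfl⟩
              · rw [show (tc ++ [(p, cur, ts)]).head? = tc.head? from
                  List.head?_append_of_ne_nil tc htcne]
                exact h1
              · rw [List.isChain_append]
                refine ⟨h3, by simp, ?_⟩
                intro x hx y hy
                rw [ha] at hx
                simp at hx hy
                subst hx; subst hy
                have : p = lt := by injection h4
                simp [pvRel, this]
        obtain ⟨c1, c2, c3⟩ := ih (some cur) (tc ++ [(p, cur, ts)]) _ cur ts hinv'
        refine ⟨c1, c2, fun hnil => ?_⟩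
        obtain ⟨d1, _, _⟩ := c3 hnil
        simp at d1
    · -- prev = none
      have hpn : prev = none := by
        rcases prev with _ | q
        · rfl
        · exact absurd ⟨q, rfl⟩ hp
      subst hpn
      have hA1 : pvAStep (none, tc) e = (some cur, tc) := by
        simp [pvAStep, ← hcur]
      have hB1 : pvBStep (none, fs, lt, lti) e = (some cur, fs, lt, lti) := by
        simp [pvBStep, ← hcur]
      rw [hA1, hB1]
      have hinv' : pvInv (some cur) tc fs lt lti := by
        refine ⟨hinv.1, fun s hs => ?_⟩
        obtain ⟨h1, h2, h3, h4⟩ := hinv.2 s hs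
        exact absurd h4 (by simp)
      obtain ⟨c1, c2, c3⟩ := ih (some cur) tc fs lt lti hinv'
      refine ⟨c1, c2, fun hnil => ?_⟩
      obtain ⟨d1, d2, d3⟩ := c3 hnil
      refine ⟨d1, ?_, by simp⟩
      intro e' he'
      rcases List.mem_cons.1 he' with he' | he'
      · subst he'; exact d3 cur rfl
      · exact d2 e' he'

-- ===== VERDICT (by name: the statement is the Claim_ definition above) =====
theorem detect_mmsi_changes_spec : Claim_equal_detect_mmsi_changes := by
  intro vd ed _ hpre
  unfold Spec_detect_mmsi_changes
  obtain ⟨hne, _⟩ := hpre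
  obtain ⟨c1, c2, c3⟩ :=
    pvLoop_lemma vd none [] none "" "" ⟨fun _ => rfl, fun s hs => nomatch hs⟩
  rcases hB : vd.foldl pvBStep (none, none, "", "") with ⟨prev', fs', lt', lti'⟩
  rcases hA : vd.foldl pvAStep (none, []) with ⟨pa, tc'⟩
  rw [hA, hB] at c1 c2
  rw [hA] at c3
  simp only at c1 c2 c3
  rw [detect_mmsi_changes, detect_mmsi_changes_alt, hA, hB]
  simp only
  rcases fs' with _ | s
  · -- no change ever: tc' = []
    have htc : tc' = [] := c2.1 rfl
    subst htc
    obtain ⟨-, d2, -⟩ := c3 rfl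
    rcases vd with _ | ⟨e0, rest⟩
    · exact absurd rfl hne
    have hv0 : some ((pvGetKey e0 "mmsi").getD "") = pa := d2 e0 (by simp)
    have hall : ∀ x ∈ (e0 :: rest).map (fun e => (pvGetKey e "mmsi").getD ""), x = (pvGetKey e0 "mmsi").getD "" := by
      intro x hx
      obtain ⟨e', he', rfl⟩ := List.mem_map.1 hx
      have := d2 e' he'
      rw [← hv0] at this
      injection this
    rw [pvSet_const _ _ hall (by simp)]
    have hpa : pa = prev' := c1
    rw [← hpa, ← hv0]
    simp
  · -- at least one change
    obtain ⟨h1, ⟨a, ha⟩, h3, -⟩ := c2.2 s rfl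
    have htcne : tc' ≠ [] := by
      intro h; subst h; simp at h1
    rw [if_neg htcne]
    by_cases hl : tc'.length > 1
    · rw [if_pos hl, ha]
      have hpop : pvPopLoop tc' (tc'.length - 1) = tc'.take 1 := by
        have := pvPopLoop_chain tc' h3 (tc'.length - 1)
          (by have := List.length_pos_iff.2 htcne; omega)
        rwa [show tc'.length - 1 + 1 = tc'.length by
          have := List.length_pos_iff.2 htcne; omega, List.take_length] at this
      rw [hpop]
      rcases tc' with _ | ⟨x, tcr⟩
      · exact absurd rfl htcne
      have hx1 : x.1 = s := by simpa using h1
      simp [hx1]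
    · rw [if_neg hl]
      rcases tc' with _ | ⟨x, tcr⟩
      · exact absurd rfl htcne
      have htcr : tcr = [] := by
        rcases tcr with _ | _
        · rfl
        · simp at hl
      subst htcr
      have hx1 : x.1 = s := by simpa using h1
      have hx2 : x = (a, lt', lti') := by simpa using ha
      rw [hx2] at hx1
      rw [hx2]
      simp at hx1
      rw [hx1]
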